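-- pv_equiv track=rewrite | github.com/jdangerx/mkrcp | foodomatic.py | count_ingredients
-- ===== SOURCE A (Python) =====
-- from collections import Counter, deque
--
-- def count_ingredients(db):
--     ing_ctr = Counter()
--     ing_dict = {}
--     for ing_list in db:
--         for ing in ing_list:
--             ing_ctr[ing] += 1
--             if ing not in ing_dict:
--                 ing_dict[ing] = Counter()
--             for other_ing in ing_list:
--                 ing_dict[ing][other_ing] += 1
--     return ing_dict, ing_ctr
-- ===== SOURCE B (Python) =====
-- from collections import Counter
--
--
-- def scale(ctr, k):
--     return Counter({key: k * v for key, v in ctr.items()})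
--
--
-- def merge(a, b):
--     out = Counter(a)
--     out.update(b)
--     return out
--
--
-- def count_ingredients(db):
--     ing_ctr = Counter(ing for lst in db for ing in lst)
--     ing_dict = {}
--     for lst in db:
--         hist = Counter(lst)
--         for ing, k in hist.items():
--             ing_dict[ing] = merge(ing_dict.get(ing, Counter()), scale(hist, k))
--     return ing_dict, ing_ctr
-- ===== Notes on version B (the rewrite author's own statement) =====
-- stated objective: alternative
-- what changed: B computes the global frequency counter in one pass over the flattened database and builds each co-occurrence row by whole-Counter arithmetic (merge a k-scaled per-list histogram into the row once per distinct ingredient) instead of A's per-occurrence unit increments with an inner rescan of the list per occurrence.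
import Mathlib
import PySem

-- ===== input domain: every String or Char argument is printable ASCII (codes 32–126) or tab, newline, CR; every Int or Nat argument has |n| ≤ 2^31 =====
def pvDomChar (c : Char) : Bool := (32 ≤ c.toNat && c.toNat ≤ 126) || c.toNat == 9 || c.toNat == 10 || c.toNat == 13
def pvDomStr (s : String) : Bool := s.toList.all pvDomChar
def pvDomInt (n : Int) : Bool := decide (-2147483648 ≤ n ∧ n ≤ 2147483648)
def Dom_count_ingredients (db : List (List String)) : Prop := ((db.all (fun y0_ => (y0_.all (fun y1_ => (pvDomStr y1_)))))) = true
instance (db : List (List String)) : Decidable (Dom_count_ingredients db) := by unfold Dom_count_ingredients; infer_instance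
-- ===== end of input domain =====

-- B computes the frequency counter in one pass over the flattened database and, separately,
-- builds each co-occurrence row by merging a scaled per-list histogram (Counter arithmetic on
-- whole rows) instead of A's per-occurrence unit increments (objective: alternative).


-- ===== PORT A =====
def count_ingredients (db : List (List String)) : (List (String × List (String × Int))) × (List (String × Int)) :=
  let st := db.foldl (fun st ing_list =>
      ing_list.foldl (fun (st : PySem.Dict String (PySem.Dict String Int) × PySem.Dict String Int) ing =>
        let ctr := st.2.modify ing 0 (· + 1)
        let d := if st.1.contains ing then st.1 else st.1.insert ing PySem.Dict.empty
        let d := ing_list.foldl (fun d other =>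
            d.modify ing PySem.Dict.empty (fun inner => inner.modify other 0 (· + 1))) d
        (d, ctr)) st)
    ((PySem.Dict.empty : PySem.Dict String (PySem.Dict String Int)), (PySem.Dict.empty : PySem.Dict String Int))
  (st.1.items.map (fun p => (p.1, p.2.items)), st.2.items)

-- ===== PORT B =====
-- B-side helper: scale(ctr, k) = Counter({key: k * v for key, v in ctr.items()})
def cscale (ctr : PySem.Dict String Int) (k : Int) : PySem.Dict String Int :=
  PySem.Dict.ofList (ctr.items.map (fun q => (q.1, k * q.2)))

-- B-side helper: merge(a, b) = copy of a, then .update(b) (adds counts; new keys append)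
def cmerge (a b : PySem.Dict String Int) : PySem.Dict String Int :=
  b.items.foldl (fun out q => out.modify q.1 0 (· + q.2)) a

def count_ingredients_alt (db : List (List String)) : (List (String × List (String × Int))) × (List (String × Int)) :=
  let ing_ctr := PySem.Dict.counter (db.flatMap (fun lst => lst))
  let ing_dict := db.foldl (fun d lst =>
      let hist := PySem.Dict.counter lst
      hist.items.foldl (fun (d : PySem.Dict String (PySem.Dict String Int)) p =>
          d.insert p.1 (cmerge (d.getD p.1 PySem.Dict.empty) (cscale hist p.2))) d)
    (PySem.Dict.empty : PySem.Dict String (PySem.Dict String Int))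
  (ing_dict.items.map (fun p => (p.1, p.2.items)), ing_ctr.items)

-- ===== PRECONDITION & SPEC =====
def Spec_count_ingredients (db : List (List String)) (out : (List (String × List (String × Int))) × (List (String × Int))) : Prop := out = count_ingredients_alt db
instance (db : List (List String)) (out : (List (String × List (String × Int))) × (List (String × Int))) : Decidable (Spec_count_ingredients db out) := by unfold Spec_count_ingredients; infer_instance

-- ===== CLAIM (what is proved, stated in full; the proofs are below) =====
def Claim_equal_count_ingredients : Prop := ∀ (db : List (List String)), Dom_count_ingredients db → Spec_count_ingredients db (count_ingredients db)

-- ===== LEMMAS AND PROOFS =====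

-- step of A's outer loop acting on the co-occurrence dict alone
def fdA (l : List String) (d : PySem.Dict String (PySem.Dict String Int)) (ing : String) :
    PySem.Dict String (PySem.Dict String Int) :=
  let d := if d.contains ing then d else d.insert ing PySem.Dict.empty
  l.foldl (fun d other =>
    d.modify ing PySem.Dict.empty (fun inner => inner.modify other 0 (· + 1))) d

-- step of A's outer loop acting on the counter alone
def fcA (c : PySem.Dict String Int) (ing : String) : PySem.Dict String Int := c.modify ing 0 (· + 1)

-- step of B's outer loop on the co-occurrence dict
def fB (d : PySem.Dict String (PySem.Dict String Int)) (l : List String) :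
    PySem.Dict String (PySem.Dict String Int) :=
  (PySem.Dict.counter l).items.foldl (fun d p =>
    d.insert p.1 (cmerge (d.getD p.1 PySem.Dict.empty) (cscale (PySem.Dict.counter l) p.2))) d

-- A's inner loop effect on one inner counter: add 1 per occurrence
def addAll (l : List String) (z : PySem.Dict String Int) : PySem.Dict String Int :=
  l.foldl (fun z x => z.modify x 0 (· + 1)) z

-- invariant: outer keys and all inner-dict keys are duplicate-free
def DInv (a : PySem.Dict String (PySem.Dict String Int)) : Prop :=
  a.keys.Nodup ∧ ∀ v, (a.getD v PySem.Dict.empty).keys.Nodup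

lemma set_update_ofList (K : PySem.Set String) (l : List String) :
    PySem.Set.update K (PySem.Set.ofList l) = PySem.Set.update K l := by
  rw [PySem.Set.update_eq_append_filter, PySem.Set.update_eq_append_filter,
    PySem.Set.ofList_ofList]

lemma set_update_update (K : PySem.Set String) (l : List String) :
    PySem.Set.update (PySem.Set.update K l) l = PySem.Set.update K l := by
  rw [PySem.Set.update_eq_append_filter (PySem.Set.update K l) l]
  have h : (List.filter (fun y => !(PySem.Set.update K l).contains y) (PySem.Set.ofList l)) = [] := by
    apply List.filter_eq_nil_iff.mpr
    intro y hy
    have hm : y ∈ PySem.Set.update K l :=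
      (PySem.Set.mem_update K l y).mpr (Or.inr ((PySem.Set.mem_ofList l y).mp hy))
    simp only [Bool.not_eq_true']
    simp only [PySem.Set.contains_eq_listContains, List.contains_eq_mem, decide_eq_false_iff_not,
      Decidable.not_not] at *
    exact hm
  rw [h, List.append_nil]

lemma set_update_const {α : Type} (K : PySem.Set String) (ing : String) (h : ing ∈ K) (m : List α) :
    PySem.Set.update K (m.map (fun _ => ing)) = K := by
  induction m with
  | nil => rfl
  | cons x xs ih =>
    rw [List.map_cons, PySem.Set.update_cons, PySem.Set.add_of_mem h, ih]

lemma dict_ext_of_keys_getD {ν : Type} (d d' : PySem.Dict String ν) (dflt : ν)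
    (hnd : d.keys.Nodup) (hk : d.keys = d'.keys)
    (hg : ∀ v, d.getD v dflt = d'.getD v dflt) : d = d' := by
  apply PySem.Dict.ext
  rw [PySem.Dict.items_eq_map_keys d hnd dflt, PySem.Dict.items_eq_map_keys d' (hk ▸ hnd) dflt, hk]
  exact List.map_congr_left (fun k _ => by rw [hg k])

lemma foldl_modify_fixed_getD {α ν : Type} (m : List α) (ing : String) (dflt : ν)
    (g : α → ν → ν) (d : PySem.Dict String ν) (v : String) :
    (m.foldl (fun d x => d.modify ing dflt (g x)) d).getD v dflt =
      if v = ing then m.foldl (fun z x => g x z) (d.getD ing dflt) else d.getD v dflt := by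
  induction m generalizing d with
  | nil =>
    simp only [List.foldl_nil]
    split_ifs with h
    · rw [h]
    · rfl
  | cons x xs ih =>
    rw [List.foldl_cons, List.foldl_cons, ih]
    by_cases h : v = ing
    · simp [h]
    · simp [h, PySem.Dict.getD_modify]

lemma fdA_getD (l : List String) (d : PySem.Dict String (PySem.Dict String Int)) (ing v : String) :
    (fdA l d ing).getD v PySem.Dict.empty =
      if v = ing then addAll l (d.getD ing PySem.Dict.empty) else d.getD v PySem.Dict.empty := by
  unfold fdA
  have h1 : ∀ w, (if d.contains ing then d else d.insert ing PySem.Dict.empty).getD w PySem.Dict.empty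
      = d.getD w PySem.Dict.empty := by
    intro w
    by_cases hc : d.contains ing
    · simp [hc]
    · simp only [Bool.not_eq_true] at hc
      rw [if_neg (by simp [hc]), PySem.Dict.getD_insert]
      split_ifs with hw
      · rw [hw, PySem.Dict.getD_of_not_contains d PySem.Dict.empty hc]
      · rfl
  rw [foldl_modify_fixed_getD l ing PySem.Dict.empty
    (fun other => fun inner => inner.modify other 0 (· + 1)), h1 v, h1 ing]
  rfl

lemma fdA_keys (l : List String) (d : PySem.Dict String (PySem.Dict String Int)) (ing : String) :
    (fdA l d ing).keys = PySem.Set.add d.keys ing := by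
  unfold fdA
  have h1 : (if d.contains ing then d else d.insert ing PySem.Dict.empty).keys
      = PySem.Set.add d.keys ing := by
    by_cases hc : d.contains ing
    · rw [if_pos hc, PySem.Set.add_of_mem ((PySem.Dict.contains_iff_mem_keys d ing).mp hc)]
    · simp only [Bool.not_eq_true] at hc
      rw [if_neg (by simp [hc]), PySem.Dict.keys_insert_of_not_contains d _ hc,
        PySem.Set.add_of_not_mem]
      intro hm
      exact absurd ((PySem.Dict.contains_iff_mem_keys d ing).mpr hm) (by simp [hc])
  rw [PySem.Dict.keys_foldl_modify_key l (fun _ => ing) PySem.Dict.empty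
    (fun _ other => fun inner => inner.modify other 0 (· + 1)), h1]
  exact set_update_const _ ing (PySem.Set.mem_add d.keys ing ing |>.mpr (Or.inr rfl)) l

lemma addAll_getD (l : List String) (z : PySem.Dict String Int) (v : String) :
    (addAll l z).getD v 0 = z.getD v 0 + l.count v := by
  exact PySem.Dict.getD_foldl_modify_add_one l z v

lemma addAll_keys (l : List String) (z : PySem.Dict String Int) :
    (addAll l z).keys = PySem.Set.update z.keys l := by
  exact PySem.Dict.keys_foldl_modify l 0 (fun _ _ => (· + 1)) z

lemma addAll_nodup (l : List String) (z : PySem.Dict String Int) (h : z.keys.Nodup) :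
    (addAll l z).keys.Nodup := by
  exact PySem.Dict.nodup_keys_foldl_modify_key l (fun x => x) 0 (fun _ _ => (· + 1)) z h

lemma G2 (c : Int → Int) (L : List (String × Int)) (z : PySem.Dict String Int) (v : String) :
    (L.foldl (fun z q => z.modify q.1 0 (fun x => x + c q.2)) z).getD v 0 =
      z.getD v 0 + ((L.filter (fun q => q.1 == v)).map (fun q => c q.2)).sum := by
  induction L generalizing z with
  | nil => simp
  | cons q L ih =>
    rw [List.foldl_cons, ih, List.filter_cons]
    by_cases h : q.1 = v
    · rw [PySem.Dict.getD_modify]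
      simp [h]
      ring
    · rw [PySem.Dict.getD_modify]
      simp [h]
      intro hq
      exact absurd hq.symm h

lemma counter_filter (l : List String) (v : String) :
    ((PySem.Dict.counter l).items.filter (fun q => q.1 == v)) =
      if v ∈ l then [(v, (l.count v : Int))] else [] := by
  rw [PySem.Dict.items_counter, List.filter_map]
  have hp : ((fun (q : String × Int) => q.1 == v) ∘ (fun k => (k, (l.count k : Int))))
      = fun k => k == v := rfl
  rw [hp, List.filter_beq]
  have hnd := PySem.Set.nodup_ofList l
  by_cases h : v ∈ l
  · have hm : v ∈ PySem.Set.ofList l := (PySem.Set.mem_ofList l v).mpr h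
    have h1 : (PySem.Set.ofList l).count v = 1 := by
      have hle := List.nodup_iff_count_le_one.mp hnd v
      have hpos := List.count_pos_iff.mpr hm
      omega
    rw [h1, if_pos h]
    rfl
  · have hm : v ∉ PySem.Set.ofList l := fun hc => h ((PySem.Set.mem_ofList l v).mp hc)
    rw [List.count_eq_zero.mpr hm, if_neg h]
    rfl

-- cscale's items: distinct fresh keys inserted from empty just lay down the mapped list
lemma cscale_items (c : PySem.Dict String Int) (hc : c.keys.Nodup) (k : Int) :
    (cscale c k).items = c.items.map (fun q => (q.1, k * q.2)) := by
  unfold cscale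
  have h := PySem.Dict.items_foldl_insert_fresh
    (l := c.items.map (fun q => (q.1, k * q.2))) (k := Prod.fst) (v := Prod.snd)
    (d := (PySem.Dict.empty : PySem.Dict String Int))
    (by intro a _; exact PySem.Dict.contains_empty _)
    (by
      have : (c.items.map (fun q => (q.1, k * q.2))).map Prod.fst = c.keys := by
        rw [List.map_map]; rfl
      rw [this]; exact hc)
  have hrw : (PySem.Dict.ofList (c.items.map fun q => (q.1, k * q.2)) : PySem.Dict String Int)
      = (c.items.map (fun q => (q.1, k * q.2))).foldl
          (fun d a => d.insert (Prod.fst a) (Prod.snd a)) PySem.Dict.empty := rfl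
  rw [hrw, h]
  simp [Function.comp_def, PySem.Dict.empty]

lemma cmerge_scale_getD (l : List String) (k : Int) (z : PySem.Dict String Int) (w : String) :
    (cmerge z (cscale (PySem.Dict.counter l) k)).getD w 0 = z.getD w 0 + k * l.count w := by
  unfold cmerge
  rw [cscale_items _ (PySem.Dict.nodup_keys_counter l) k]
  have hfold : ((PySem.Dict.counter l).items.map (fun q => (q.1, k * q.2))).foldl
      (fun out q => out.modify q.1 0 (· + q.2)) z
      = ((PySem.Dict.counter l).items.map (fun q => (q.1, k * q.2))).foldl
          (fun out q => out.modify q.1 0 (fun x => x + (fun y => y) q.2)) z := rfl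
  rw [hfold, G2 (fun y => y)]
  have hfilt : (((PySem.Dict.counter l).items.map (fun q => (q.1, k * q.2))).filter
      (fun q => q.1 == w)) = ((PySem.Dict.counter l).items.filter (fun q => q.1 == w)).map
        (fun q => (q.1, k * q.2)) := by
    rw [List.filter_map]
    rfl
  rw [hfilt, counter_filter]
  by_cases h : w ∈ l
  · rw [if_pos h]; simp
  · rw [if_neg h, List.count_eq_zero.mpr h]; simp

lemma cmerge_scale_keys (l : List String) (k : Int) (z : PySem.Dict String Int) :
    (cmerge z (cscale (PySem.Dict.counter l) k)).keys = PySem.Set.update z.keys l := by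
  unfold cmerge
  rw [cscale_items _ (PySem.Dict.nodup_keys_counter l) k,
    PySem.Dict.keys_foldl_modify_key ((PySem.Dict.counter l).items.map (fun q => (q.1, k * q.2)))
      (fun q => q.1) 0 (fun _ q => (· + q.2)) z]
  have hm : (((PySem.Dict.counter l).items.map (fun q => (q.1, k * q.2))).map (fun q => q.1))
      = PySem.Set.ofList l := by
    rw [List.map_map]
    have := PySem.Dict.keys_counter l
    simpa [PySem.Dict.keys, Function.comp] using this
  rw [hm, set_update_ofList]

lemma iter_addAll_getD (l : List String) (n : Nat) (z : PySem.Dict String Int) (v : String) :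
    ((addAll l)^[n] z).getD v 0 = z.getD v 0 + n * l.count v := by
  induction n generalizing z with
  | zero => simp
  | succ n ih =>
    rw [Function.iterate_succ_apply, ih, addAll_getD]
    push_cast
    ring

lemma iter_addAll_keys (l : List String) (n : Nat) (hn : n ≠ 0) (z : PySem.Dict String Int) :
    ((addAll l)^[n] z).keys = PySem.Set.update z.keys l := by
  induction n generalizing z with
  | zero => exact absurd rfl hn
  | succ n ih =>
    by_cases h : n = 0
    · subst h
      rw [Function.iterate_one, addAll_keys]
    · rw [Function.iterate_succ_apply, ih h, addAll_keys, set_update_update]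

lemma iter_addAll_nodup (l : List String) (n : Nat) (z : PySem.Dict String Int) (h : z.keys.Nodup) :
    ((addAll l)^[n] z).keys.Nodup := by
  induction n generalizing z with
  | zero => exact h
  | succ n ih =>
    rw [Function.iterate_succ_apply]
    exact ih _ (addAll_nodup l z h)

-- A's n repeated unit-increment sweeps equal B's single merge of the n-scaled histogram
lemma inner_eq (l : List String) (z : PySem.Dict String Int) (hz : z.keys.Nodup)
    (n : Nat) (hn : n ≠ 0) :
    (addAll l)^[n] z = cmerge z (cscale (PySem.Dict.counter l) (n : Int)) := by
  apply dict_ext_of_keys_getD _ _ (0 : Int)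
  · exact iter_addAll_nodup l n z hz
  · rw [iter_addAll_keys l n hn, cmerge_scale_keys]
  · intro v
    rw [iter_addAll_getD, cmerge_scale_getD]

lemma foldA_getD (l : List String) (v : String) :
    ∀ (m : List String) (a : PySem.Dict String (PySem.Dict String Int)),
      (m.foldl (fdA l) a).getD v PySem.Dict.empty =
        (addAll l)^[m.count v] (a.getD v PySem.Dict.empty) := by
  intro m
  induction m with
  | nil => intro a; simp
  | cons x xs ih =>
    intro a
    rw [List.foldl_cons, ih, fdA_getD]
    by_cases h : v = x
    · rw [if_pos h, h, List.count_cons_self, Function.iterate_succ_apply]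
    · rw [if_neg h, List.count_cons_of_ne (fun hc => h hc.symm)]

lemma foldA_keys (l : List String) :
    ∀ (m : List String) (a : PySem.Dict String (PySem.Dict String Int)),
      (m.foldl (fdA l) a).keys = PySem.Set.update a.keys m := by
  intro m
  induction m with
  | nil => intro a; simp [PySem.Set.update]
  | cons x xs ih =>
    intro a
    rw [List.foldl_cons, ih, fdA_keys, PySem.Set.update_cons]

-- B's insert loop touches each key at most once; lookups factor through the key filter
lemma foldB_getD_gen (l : List String) (v : String) :
    ∀ (L : List (String × Int)) (a : PySem.Dict String (PySem.Dict String Int)),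
      (L.foldl (fun d p =>
          d.insert p.1 (cmerge (d.getD p.1 PySem.Dict.empty)
            (cscale (PySem.Dict.counter l) p.2))) a).getD v PySem.Dict.empty =
        (L.filter (fun q => q.1 == v)).foldl
          (fun z p => cmerge z (cscale (PySem.Dict.counter l) p.2))
          (a.getD v PySem.Dict.empty) := by
  intro L
  induction L with
  | nil => intro a; simp
  | cons p L ih =>
    intro a
    rw [List.foldl_cons, ih, List.filter_cons]
    by_cases h : p.1 = v
    · rw [if_pos (by simp [h]), List.foldl_cons, PySem.Dict.getD_insert, if_pos h.symm, h]
    · rw [if_neg (by simp [h]), PySem.Dict.getD_insert, if_neg (fun hc => h hc.symm)]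

lemma foldB_keys (l : List String) (a : PySem.Dict String (PySem.Dict String Int)) :
    (fB a l).keys = PySem.Set.update a.keys l := by
  unfold fB
  rw [PySem.Dict.keys_foldl_insert_key (PySem.Dict.counter l).items (fun q => q.1)
    (fun d p => cmerge (d.getD p.1 PySem.Dict.empty) (cscale (PySem.Dict.counter l) p.2)) a]
  have hm : (PySem.Dict.counter l).items.map (fun q => q.1) = PySem.Set.ofList l := by
    have := PySem.Dict.keys_counter l
    simpa [PySem.Dict.keys] using this
  rw [hm, set_update_ofList]

-- one list: A's per-occurrence sweep equals B's histogram-insert pass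
lemma dict_step_eq (l : List String) (a : PySem.Dict String (PySem.Dict String Int)) (ha : DInv a) :
    l.foldl (fdA l) a = fB a l := by
  apply dict_ext_of_keys_getD _ _ PySem.Dict.empty
  · rw [foldA_keys]
    exact PySem.Set.nodup_update _ _ ha.1
  · rw [foldA_keys, foldB_keys]
  · intro v
    rw [foldA_getD]
    unfold fB
    rw [foldB_getD_gen, counter_filter]
    by_cases h : v ∈ l
    · rw [if_pos h, List.foldl_cons, List.foldl_nil]
      have hn : l.count v ≠ 0 := by
        have := List.count_pos_iff.mpr h
        omega
      exact inner_eq l _ (ha.2 v) _ hn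
    · rw [if_neg h, List.count_eq_zero.mpr h, Function.iterate_zero_apply, List.foldl_nil]

lemma dinv_foldA (l : List String) (a : PySem.Dict String (PySem.Dict String Int)) (ha : DInv a) :
    DInv (l.foldl (fdA l) a) := by
  constructor
  · rw [foldA_keys]
    exact PySem.Set.nodup_update _ _ ha.1
  · intro v
    rw [foldA_getD]
    exact iter_addAll_nodup l _ _ (ha.2 v)

lemma dict_state_eq :
    ∀ (db : List (List String)) (a : PySem.Dict String (PySem.Dict String Int)), DInv a →
      db.foldl (fun a l => l.foldl (fdA l) a) a = db.foldl fB a := by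
  intro db
  induction db with
  | nil => intro a _; rfl
  | cons l db ih =>
    intro a ha
    rw [List.foldl_cons, List.foldl_cons, ← dict_step_eq l a ha]
    exact ih _ (dinv_foldA l a ha)

-- A's incremental global counter is the Counter of the flattened database
lemma ctr_flat_eq (db : List (List String)) :
    db.foldl (fun b l => l.foldl fcA b) PySem.Dict.empty
      = PySem.Dict.counter (db.flatMap (fun lst => lst)) := by
  have h1 : db.flatMap (fun lst => lst) = db.flatten := List.flatMap_id'
  have h2 : PySem.Dict.counter db.flatten
      = db.flatten.foldl (fun d x => d.modify x 0 (· + 1)) PySem.Dict.empty := rfl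
  rw [h1, h2, List.foldl_flatten]
  rfl

-- ===== VERDICT (by name: the statement is the Claim_ definition above) =====
theorem count_ingredients_spec : Claim_equal_count_ingredients := by
  intro db _
  unfold Spec_count_ingredients count_ingredients count_ingredients_alt
  have hA : (fun (st : PySem.Dict String (PySem.Dict String Int) × PySem.Dict String Int)
        (ing_list : List String) =>
      ing_list.foldl (fun (st : PySem.Dict String (PySem.Dict String Int) × PySem.Dict String Int) ing =>
        let ctr := st.2.modify ing 0 (· + 1)
        let d := if st.1.contains ing then st.1 else st.1.insert ing PySem.Dict.empty
        let d := ing_list.foldl (fun d other =>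
            d.modify ing PySem.Dict.empty (fun inner => inner.modify other 0 (· + 1))) d
        (d, ctr)) st)
      = (fun st l => (l.foldl (fdA l) st.1, l.foldl fcA st.2)) := by
    funext st l
    cases st with
    | mk a b => exact PySem.List.foldl_prod_mk (f := fdA l) (g := fcA) l a b
  rw [hA]
  rw [PySem.List.foldl_prod_mk (f := fun a l => l.foldl (fdA l) a)
    (g := fun b l => l.foldl fcA b) db PySem.Dict.empty PySem.Dict.empty]
  have hinv1 : DInv (PySem.Dict.empty : PySem.Dict String (PySem.Dict String Int)) := by
    constructor
    · exact List.nodup_nil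
    · intro v
      rw [PySem.Dict.getD_empty]
      exact List.nodup_nil
  rw [dict_state_eq db PySem.Dict.empty hinv1, ctr_flat_eq db]
  rfl
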